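-- pv_equiv track=rewrite | github.com/Ray221f/Combinatorial-Algorithms-Assignment-1 | ds_comb_alg_ass_1-2.py | trotter_johnson_rank
-- ===== SOURCE A (Python) =====
-- def trotter_johnson_rank(perm):
--     rank = 0
--     n = len(perm)
--     for i in range(n):
--         k = perm[i]
--         left = perm[:i]
--         smaller = sum(1 for x in left if x < k)
--         if i % 2 == 1:
--             smaller = k - 1 - smaller
--         rank = rank * (i + 1) + smaller
--     return rank
-- ===== SOURCE B (Python) =====
-- def trotter_johnson_rank(perm):
--     rank = 0
--     sorted_prefix = []
--     for i, k in enumerate(perm):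
--         lo, hi = 0, len(sorted_prefix)
--         while lo < hi:
--             mid = (lo + hi) // 2
--             if sorted_prefix[mid] < k:
--                 lo = mid + 1
--             else:
--                 hi = mid
--         smaller = lo
--         if i % 2 == 1:
--             smaller = k - 1 - smaller
--         rank = rank * (i + 1) + smaller
--         sorted_prefix.insert(lo, k)
--     return rank
-- ===== Notes on version B (the rewrite author's own statement) =====
-- stated objective: faster
-- what changed: Maintains an incrementally built sorted prefix and finds each element's smaller-count by binary search (then inserts it), instead of re-scanning the whole prefix with a generator sum at every step.
import Mathlib
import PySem

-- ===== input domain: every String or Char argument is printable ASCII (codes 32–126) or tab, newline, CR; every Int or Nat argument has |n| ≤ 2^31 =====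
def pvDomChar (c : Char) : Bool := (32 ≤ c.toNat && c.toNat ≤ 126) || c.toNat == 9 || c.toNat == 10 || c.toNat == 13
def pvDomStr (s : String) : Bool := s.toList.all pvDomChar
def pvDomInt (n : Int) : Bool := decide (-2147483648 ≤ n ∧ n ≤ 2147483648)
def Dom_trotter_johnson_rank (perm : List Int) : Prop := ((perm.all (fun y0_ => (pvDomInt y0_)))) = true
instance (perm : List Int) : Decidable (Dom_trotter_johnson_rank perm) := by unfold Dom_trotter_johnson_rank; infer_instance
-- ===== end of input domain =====

-- B replaces A's per-step rescan of the prefix by a maintained sorted prefix with binary search; measured faster (constant factor).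


-- ===== PORT A =====
-- literal transliteration of A: fold over range(n); perm[i] is always in range (i < n), so getD is exact;
-- sum(1 for x in left if x < k) is the count of elements of left below k.
def trotter_johnson_rank (perm : List Int) : Int :=
  let n := perm.length
  (List.range n).foldl
    (fun rank i =>
      let k := perm.getD i 0                                   -- k = perm[i]
      let left := perm.take i                                  -- left = perm[:i]
      let smaller : Int := (left.countP (fun x => x < k) : Nat) -- sum(1 for x in left if x < k)
      let smaller := if i % 2 = 1 then k - 1 - smaller else smaller
      rank * ((i : Int) + 1) + smaller)
    0

-- ===== PORT B =====
-- the while lo < hi binary-search loop of Source B; sorted_prefix[mid] is always in range (mid < hi ≤ len), so getD is exact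
def tjBisect (s : List Int) (k : Int) (lo hi : Nat) : Nat :=
  if lo < hi then
    let mid := (lo + hi) / 2
    if s.getD mid 0 < k then tjBisect s k (mid + 1) hi else tjBisect s k lo mid
  else lo
termination_by hi - lo
decreasing_by all_goals omega

-- the for loop of Source B: i the index, sp the sorted prefix, rank the accumulator;
-- sorted_prefix.insert(lo, k) is take lo ++ k :: drop lo
def tjGo (rest : List Int) (i : Nat) (sp : List Int) (rank : Int) : Int :=
  match rest with
  | [] => rank
  | k :: rest' =>
    let lo := tjBisect sp k 0 sp.length
    let smaller : Int := (lo : Nat)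
    let smaller := if i % 2 = 1 then k - 1 - smaller else smaller
    tjGo rest' (i + 1) (sp.take lo ++ k :: sp.drop lo) (rank * ((i : Int) + 1) + smaller)

def trotter_johnson_rank_alt (perm : List Int) : Int := tjGo perm 0 [] 0

-- ===== PRECONDITION & SPEC =====
def Spec_trotter_johnson_rank (perm : List Int) (out : Int) : Prop := out = trotter_johnson_rank_alt perm
instance (perm : List Int) (out : Int) : Decidable (Spec_trotter_johnson_rank perm out) := by unfold Spec_trotter_johnson_rank; infer_instance

-- ===== CLAIM (what is proved, stated in full; the proofs are below) =====
def Claim_equal_trotter_johnson_rank : Prop := ∀ (perm : List Int), Dom_trotter_johnson_rank perm → Spec_trotter_johnson_rank perm (trotter_johnson_rank perm)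

-- ===== LEMMAS AND PROOFS =====

-- number of elements of s strictly below k
def tjC (s : List Int) (k : Int) : Nat := s.countP (fun x => decide (x < k))

-- in a sorted list, the elements below k occupy exactly the first (tjC s k) positions
theorem tjC_lt_iff (s : List Int) (k : Int) (hs : s.Pairwise (· ≤ ·))
    (j : Nat) (hj : j < s.length) : s[j] < k ↔ j < tjC s k := by
  have hmono : ∀ a b (ha : a < s.length) (hb : b < s.length), a ≤ b → s[a] ≤ s[b] := by
    intro a b ha hb hab
    rcases Nat.eq_or_lt_of_le hab with h | h
    · subst h; rfl
    · exact (List.pairwise_iff_getElem.mp hs) a b ha hb h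
  constructor
  · intro hlt
    have hsplit : tjC s k = (s.take (j+1)).countP (fun x => decide (x < k)) +
        (s.drop (j+1)).countP (fun x => decide (x < k)) := by
      unfold tjC
      rw [← List.countP_append, List.take_append_drop]
    have hall : (s.take (j+1)).countP (fun x => decide (x < k)) = (s.take (j+1)).length := by
      apply List.countP_eq_length.mpr
      intro x hx
      rcases List.mem_iff_getElem.mp hx with ⟨m, hm, rfl⟩
      have hm' : m < s.length := lt_of_lt_of_le hm (by simp [List.length_take])
      have : m ≤ j := by simp [List.length_take] at hm; omega
      simp only [List.getElem_take]
      exact decide_eq_true (lt_of_le_of_lt (hmono m j hm' hj this) hlt)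
    have hlen : (s.take (j+1)).length = j + 1 := by simp [List.length_take]; omega
    omega
  · intro hC
    by_contra hge
    have hsplit : tjC s k = (s.take j).countP (fun x => decide (x < k)) +
        (s.drop j).countP (fun x => decide (x < k)) := by
      unfold tjC
      rw [← List.countP_append, List.take_append_drop]
    have hzero : (s.drop j).countP (fun x => decide (x < k)) = 0 := by
      apply List.countP_eq_zero.mpr
      intro x hx
      rcases List.mem_iff_getElem.mp hx with ⟨m, hm, rfl⟩
      simp only [List.getElem_drop]
      have hjm : j + m < s.length := by simp at hm; omega
      have : s[j] ≤ s[j + m] := hmono j (j + m) hj hjm (by omega)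
      simp; omega
    have hle : (s.take j).countP (fun x => decide (x < k)) ≤ j := by
      calc (s.take j).countP (fun x => decide (x < k)) ≤ (s.take j).length := List.countP_le_length
        _ ≤ j := by simp
    omega

theorem tjBisect_eq (s : List Int) (k : Int) (hs : s.Pairwise (· ≤ ·)) :
    ∀ lo hi, lo ≤ tjC s k → tjC s k ≤ hi → hi ≤ s.length → tjBisect s k lo hi = tjC s k := by
  have aux : ∀ d lo hi, hi - lo ≤ d → lo ≤ tjC s k → tjC s k ≤ hi → hi ≤ s.length →
      tjBisect s k lo hi = tjC s k := by
    intro d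
    induction d with
    | zero =>
      intro lo hi h0 h1 h2 h3
      rw [tjBisect]
      have hnl : ¬ lo < hi := by omega
      simp only [hnl, if_false]
      omega
    | succ d ih =>
      intro lo hi h0 h1 h2 h3
      rw [tjBisect]
      by_cases hlh : lo < hi
      · simp only [hlh, if_true]
        have hmlt : (lo + hi) / 2 < s.length := by omega
        have hgd : s.getD ((lo + hi) / 2) 0 = s[(lo + hi) / 2] := List.getD_eq_getElem s 0 hmlt
        by_cases hc : s[(lo + hi) / 2] < k
        · have hC : (lo + hi) / 2 < tjC s k := (tjC_lt_iff s k hs _ hmlt).mp hc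
          simp only [hgd, hc, if_true]
          exact ih ((lo + hi) / 2 + 1) hi (by omega) (by omega) h2 h3
        · have hC : ¬ (lo + hi) / 2 < tjC s k := fun h => hc ((tjC_lt_iff s k hs _ hmlt).mpr h)
          simp only [hgd, hc, if_false]
          exact ih lo ((lo + hi) / 2) (by omega) h1 (by omega) (by omega)
      · simp only [hlh, if_false]
        omega
  intro lo hi
  exact aux hi lo hi (by omega)

-- inserting k at position tjC s k keeps the list sorted
theorem tjInsert_sorted (s : List Int) (k : Int) (hs : s.Pairwise (· ≤ ·)) :
    (s.take (tjC s k) ++ k :: s.drop (tjC s k)).Pairwise (· ≤ ·) := by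
  have hCle : tjC s k ≤ s.length := List.countP_le_length
  have hmemtake : ∀ x ∈ s.take (tjC s k), x < k := by
    intro x hx
    rcases List.mem_iff_getElem.mp hx with ⟨m, hm, rfl⟩
    have hmC : m < tjC s k := by simp [List.length_take] at hm; omega
    have hm' : m < s.length := by omega
    rw [List.getElem_take]
    exact (tjC_lt_iff s k hs m hm').mpr hmC
  have hmemdrop : ∀ x ∈ s.drop (tjC s k), k ≤ x := by
    intro x hx
    rcases List.mem_iff_getElem.mp hx with ⟨m, hm, rfl⟩
    have hm' : tjC s k + m < s.length := by simp [List.length_drop] at hm; omega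
    rw [List.getElem_drop]
    have : ¬ s[tjC s k + m] < k := fun h => by
      have := (tjC_lt_iff s k hs _ hm').mp h; omega
    omega
  rw [List.pairwise_append]
  refine ⟨hs.sublist (List.take_sublist _ _), ?_, ?_⟩
  · rw [List.pairwise_cons]
    exact ⟨hmemdrop, hs.sublist (List.drop_sublist _ _)⟩
  · intro x hx y hy
    rcases List.mem_cons.mp hy with rfl | hy'
    · exact le_of_lt (hmemtake x hx)
    · exact le_trans (le_of_lt (hmemtake x hx)) (hmemdrop y hy')

theorem tjGo_eq (perm : List Int) :
    ∀ rest i sp rank, sp.Pairwise (· ≤ ·) → sp.Perm (perm.take i) → rest = perm.drop i →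
      i ≤ perm.length →
      tjGo rest i sp rank =
        (List.range' i (perm.length - i)).foldl
          (fun rank i =>
            let k := perm.getD i 0
            let left := perm.take i
            let smaller : Int := (left.countP (fun x => x < k) : Nat)
            let smaller := if i % 2 = 1 then k - 1 - smaller else smaller
            rank * ((i : Int) + 1) + smaller) rank := by
  intro rest
  induction rest with
  | nil =>
    intro i sp rank hsort hperm hrest hi
    have h0 : perm.length ≤ i := List.drop_eq_nil_iff.mp hrest.symm
    have h1 : perm.length - i = 0 := by omega
    rw [h1]
    simp [tjGo]
  | cons k rest' ih =>
    intro i sp rank hsort hperm hrest hi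
    have hin : i < perm.length := by
      by_contra h
      rw [List.drop_eq_nil_of_le (by omega)] at hrest
      exact (List.cons_ne_nil _ _) hrest
    rw [List.drop_eq_getElem_cons hin] at hrest
    injection hrest with hk hrest'
    subst hk
    have hlo : tjBisect sp (perm[i]) 0 sp.length = tjC sp (perm[i]) :=
      tjBisect_eq sp (perm[i]) hsort 0 sp.length (Nat.zero_le _) List.countP_le_length (le_refl _)
    have hcount : tjC sp (perm[i]) = (perm.take i).countP (fun x => decide (x < perm[i])) :=
      hperm.countP_eq _
    have hn : perm.length - i = (perm.length - (i + 1)) + 1 := by omega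
    rw [hn, List.range'_succ, List.foldl_cons]
    simp only [tjGo, hlo]
    rw [ih (i + 1) _ _ ?_ ?_ hrest' (by omega)]
    · congr 2
      · rw [List.getD_eq_getElem perm 0 hin, hcount]
    · exact tjInsert_sorted sp (perm[i]) hsort
    · have h1 : List.Perm (sp.take (tjC sp (perm[i])) ++ perm[i] :: sp.drop (tjC sp (perm[i])))
          (perm[i] :: sp) := by
        have := List.perm_middle (a := perm[i]) (l₁ := sp.take (tjC sp (perm[i])))
          (l₂ := sp.drop (tjC sp (perm[i])))
        rwa [List.take_append_drop] at this
      have h2 : List.Perm (perm[i] :: sp) (perm.take i ++ [perm[i]]) :=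
        ((hperm.cons perm[i]).trans (List.perm_append_singleton _ _).symm)
      have h3 : perm.take (i + 1) = perm.take i ++ [perm[i]] := by
        rw [List.take_add_one, List.getElem?_eq_getElem hin]
        rfl
      rw [h3]
      exact h1.trans h2

-- ===== VERDICT (by name: the statement is the Claim_ definition above) =====
theorem trotter_johnson_rank_spec : Claim_equal_trotter_johnson_rank := by
  intro perm _
  unfold Spec_trotter_johnson_rank trotter_johnson_rank trotter_johnson_rank_alt
  rw [tjGo_eq perm perm 0 [] 0 (by simp) (by simp) (by simp) (by omega)]
  simp [List.range_eq_range']
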